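-- pv_equiv track=rewrite | github.com/Jeensh/J_alchive | samsung_SW/이차원_배열과_연산.py | op_C
-- ===== SOURCE A (Python) =====
-- def op_C(A):
--     # A 행렬 뒤집기
--     A = spin(A)
--
--     # A 배열 분석
--     A_len = len(A)
--     tmp = [[] for i in range(A_len)]
--     for x in range(A_len):
--         MAX = max(A[x])
--         for i in range(1, MAX + 1):
--             n = A[x].count(i)
--             if n == 0:
--                 continue
--             tmp[x].append((n, i))
--         tmp[x].sort()
--
--     # 분석 결과로 정렬 수행한 행렬 만들기
--     result = [[] for i in range(A_len)]
--     MAX_len = 0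
--     for x in range(A_len):
--         for item in tmp[x]:
--             n, i = item
--             result[x].append(i)
--             result[x].append(n)
--         MAX_len = max(MAX_len, len(result[x]))
--
--     # 정렬 수행한 행렬에 0 알맞게 채우기
--     for x in range(A_len):
--         padding = MAX_len - len(result[x])
--         for i in range(padding):
--             result[x].append(0)
--
--     # 행렬 뒤집기
--     result = spin(result)
--
--     return result
--
-- def spin(A):
--     r = len(A)
--     c = len(A[0])
--     result = [[0] * r for i in range(c)]
--     for x in range(r):
--         for y in range(c):
--             result[y][x] = A[x][y]
--     return result
-- ===== SOURCE B (Python) =====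
-- def op_C(A):
--     nrows, ncols = len(A), len(A[0])
--     seqs = []
--     for c in range(ncols):
--         freq = {}
--         for r in range(nrows):
--             v = A[r][c]
--             if v >= 1:
--                 freq[v] = freq.get(v, 0) + 1
--         flat = []
--         for n, v in sorted((n, v) for v, n in freq.items()):
--             flat.append(v)
--             flat.append(n)
--         seqs.append(flat)
--     max_len = max((len(s) for s in seqs), default=0)
--     return [[s[i] if i < len(s) else 0 for s in seqs] for i in range(max_len)]
-- ===== Notes on version B (the rewrite author's own statement) =====
-- stated objective: faster
-- what changed: B drops both transpose (spin) passes and A's value-by-value counting loop over range(1, max+1): it walks each original column once building a frequency dict of the values >= 1, sorts the (count, value) pairs, and assembles the output grid directly, padding with 0 on the fly.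
import Mathlib
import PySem

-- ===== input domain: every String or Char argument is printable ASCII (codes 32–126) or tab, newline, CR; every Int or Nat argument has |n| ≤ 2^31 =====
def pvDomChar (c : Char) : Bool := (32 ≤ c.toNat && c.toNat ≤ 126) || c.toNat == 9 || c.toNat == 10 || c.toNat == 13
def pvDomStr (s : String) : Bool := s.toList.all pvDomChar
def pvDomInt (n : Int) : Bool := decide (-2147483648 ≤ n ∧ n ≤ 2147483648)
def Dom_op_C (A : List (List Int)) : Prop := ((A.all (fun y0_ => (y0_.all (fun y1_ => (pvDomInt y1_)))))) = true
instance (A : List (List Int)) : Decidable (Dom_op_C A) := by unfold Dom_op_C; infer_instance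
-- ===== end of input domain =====

-- B replaces A's transpose/analyse/transpose pipeline by a single direct column-wise pass
-- (frequency dictionary per original column, then the output grid is assembled directly);
-- same return value on every input admitted by Pre_op_C.

-- ===== PORT A =====
-- helper `spin` of A: nested write loops; `len(A[0])` is ported as (M.headD []).length and the
-- indexing M[x][y] as getD with defaults — exact whenever the Python does not raise (Pre_op_C).
def spin (M : List (List Int)) : List (List Int) :=
  (List.range M.length).foldl
    (fun res x => (List.range (M.headD []).length).foldl
      (fun res y => res.set y ((res.getD y []).set x ((M.getD x []).getD y 0))) res)
    (List.replicate (M.headD []).length (List.replicate M.length (0 : Int)))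

-- A's per-row analysis: MAX = max(A[x]) (row nonempty under Pre_op_C), counts of i in 1..MAX, sort
def analyzeRow (row : List Int) : List (Int × Int) :=
  let MAX := (PySem.List.max? row (fun v => v)).getD 0
  let pairs := (PySem.List.pyRange 1 (MAX + 1)).foldl
      (fun tm i =>
        if PySem.List.count row i = 0 then tm
        else tm ++ [((PySem.List.count row i : Int), i)]) []
  PySem.List.sorted2 pairs (fun p => p.1) (fun p => p.2)

def op_C (A : List (List Int)) : List (List Int) :=
  let B := spin A
  let tmp := B.map analyzeRow
  let result0 := tmp.map (fun t => t.foldl (fun acc p => acc ++ [p.2] ++ [p.1]) [])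
  let MAXlen := result0.foldl (fun m row => max m row.length) 0
  let result := result0.map (fun row => row ++ List.replicate (MAXlen - row.length) (0 : Int))
  spin result

-- ===== PORT B =====
-- B's per-column pass: frequency dict of the values ≥ 1 in column c, sorted (count, value) pairs,
-- flattened to value, count, value, count, …
def colFlat (A : List (List Int)) (c : Nat) : List Int :=
  let freq := (List.range A.length).foldl
      (fun d r =>
        if 1 ≤ (A.getD r []).getD c 0 then
          d.insert ((A.getD r []).getD c 0) (d.getD ((A.getD r []).getD c 0) 0 + 1)
        else d)
      (PySem.Dict.empty : PySem.Dict Int Int)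
  let pairs := PySem.List.sorted2 (freq.items.map (fun p => (p.2, p.1)))
      (fun p => p.1) (fun p => p.2)
  pairs.foldl (fun fl p => fl ++ [p.2, p.1]) []

def op_C_alt (A : List (List Int)) : List (List Int) :=
  let ncols := (A.headD []).length
  let seqs := (List.range ncols).map (fun c => colFlat A c)
  let maxLen := seqs.foldl (fun m s => max m s.length) 0
  (List.range maxLen).map (fun i => seqs.map (fun s => if i < s.length then s.getD i 0 else 0))

-- ===== PRECONDITION & SPEC =====
-- Pre_ excludes exactly the inputs on which the Python A raises: the empty matrix and an empty
-- first row (IndexError via len(A[0]) / spin) and matrices with a row shorter than the first row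
-- (IndexError on A[x][y] inside spin).
def Pre_op_C (A : List (List Int)) : Prop :=
  A ≠ [] ∧ (A.headD []) ≠ [] ∧ ∀ row ∈ A, (A.headD []).length ≤ row.length
instance (A : List (List Int)) : Decidable (Pre_op_C A) := by unfold Pre_op_C; infer_instance

def pvWitness_op_C : List (List Int) := [[1, 2], [2, 2]]

def Spec_op_C (A : List (List Int)) (out : List (List Int)) : Prop := out = op_C_alt A
instance (A : List (List Int)) (out : List (List Int)) : Decidable (Spec_op_C A out) := by unfold Spec_op_C; infer_instance

-- ===== CLAIM (what is proved, stated in full; the proofs are below) =====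
def Claim_equal_op_C : Prop := ∀ (A : List (List Int)), Dom_op_C A → Pre_op_C A → Spec_op_C A (op_C A)

-- ===== LEMMAS AND PROOFS =====

lemma map_getD_range {α β : Type} (l : List α) (d : α) (F : α → β) :
    (List.range l.length).map (fun x => F (l.getD x d)) = l.map F := by
  apply List.ext_getElem
  · simp
  · intro i h1 h2
    simp only [List.getElem_map, List.getElem_range]
    rw [List.getD_eq_getElem _ _ (by simpa using h2)]

lemma foldl_getD_range {α β : Type} (l : List α) (d : α) (F : β → α → β) (init : β) :
    (List.range l.length).foldl (fun acc x => F acc (l.getD x d)) init = l.foldl F init := by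
  have h := map_getD_range l d (fun a => a)
  simp only [List.map_id'] at h
  conv_rhs => rw [← h]
  rw [List.foldl_map]

lemma fold_set {α : Type} (d : α) (g : Nat → α → α) :
    ∀ (n : Nat) (res : List α),
      (List.range n).foldl (fun r y => r.set y (g y (r.getD y d))) res
        = res.mapIdx (fun i a => if i < n then g i a else a) := by
  intro n
  induction n with
  | zero =>
    intro res
    simp only [List.range_zero, List.foldl_nil]
    apply List.ext_getElem
    · simp
    · intro i h1 h2; simp [List.getElem_mapIdx]
  | succ n ih =>
    intro res
    rw [List.range_succ, List.foldl_append, ih]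
    simp only [List.foldl_cons, List.foldl_nil]
    by_cases h : n < res.length
    · have hX : (res.mapIdx fun i a => if i < n then g i a else a).getD n d = res[n] := by
        rw [List.getD_eq_getElem _ _ (by simpa using h), List.getElem_mapIdx]
        simp
      rw [hX]
      apply List.ext_getElem
      · simp
      · intro i h1 h2
        simp only [List.getElem_set, List.getElem_mapIdx]
        by_cases hni : n = i
        · subst hni; simp
        · by_cases hi : i < n
          · simp [hni, hi, Nat.lt_succ_of_lt hi]
          · simp [hni, hi, show ¬ i < n + 1 by omega]
    · rw [Nat.not_lt] at h
      rw [List.set_eq_of_length_le (by simpa using h)]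
      apply List.ext_getElem
      · simp
      · intro i h1 h2
        simp only [List.getElem_mapIdx]
        have hi : i < n := lt_of_lt_of_le (by simpa using h1) h
        simp [hi, Nat.lt_succ_of_lt hi]

lemma outer_fold (f : Nat → Nat → Int) (r c : Nat) :
    ∀ (k : Nat), k ≤ r →
      (List.range k).foldl
          (fun res x => (List.range c).foldl
            (fun res y => res.set y ((res.getD y []).set x (f x y))) res)
          (List.replicate c (List.replicate r (0 : Int)))
        = (List.range c).map (fun y => (List.range r).map (fun x => if x < k then f x y else 0)) := by
  intro k
  induction k with
  | zero =>
    intro _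
    simp only [List.range_zero, List.foldl_nil]
    apply List.ext_getElem
    · simp
    · intro y h1 h2
      simp only [List.getElem_replicate, List.getElem_map, List.getElem_range]
      apply List.ext_getElem
      · simp
      · intro x hx1 hx2
        simp
  | succ k ih =>
    intro hk
    have hkr : k < r := hk
    rw [List.range_succ, List.foldl_append, ih (Nat.le_of_lt hkr)]
    simp only [List.foldl_cons, List.foldl_nil]
    rw [fold_set [] (fun y row => row.set k (f k y)) c]
    apply List.ext_getElem
    · simp
    · intro y h1 h2
      have hy : y < c := by simpa using h1
      simp only [List.getElem_mapIdx, List.getElem_map, List.getElem_range, if_pos hy]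
      apply List.ext_getElem
      · simp
      · intro x hx1 hx2
        have hxr : x < r := by simpa using hx2
        simp only [List.getElem_set, List.getElem_map, List.getElem_range]
        by_cases hkx : k = x
        · subst hkx; simp
        · by_cases hx : x < k
          · simp [hkx, hx, Nat.lt_succ_of_lt hx]
          · simp [hkx, hx, show ¬ x < k + 1 by omega]

lemma spin_eq (M : List (List Int)) :
    spin M = (List.range (M.headD []).length).map (fun y => M.map (fun row => row.getD y 0)) := by
  unfold spin
  rw [outer_fold (fun x y => (M.getD x []).getD y 0) M.length (M.headD []).length M.length le_rfl]
  refine List.map_congr_left (fun y _ => ?_)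
  rw [show ((List.range M.length).map
        (fun x => if x < M.length then (M.getD x []).getD y 0 else 0))
      = (List.range M.length).map (fun x => (M.getD x []).getD y 0) from
    List.map_congr_left (fun x hx => by simp [List.mem_range.mp hx])]
  exact map_getD_range M [] (fun row => row.getD y 0)

-- the two-key Python tuple sort is the one-key sort under the lexicographic order on pairs
lemma sorted2_eq_sorted_lex (xs : List (Int × Int)) :
    PySem.List.sorted2 xs (fun p => p.1) (fun p => p.2)
      = PySem.List.sorted xs (fun p => (toLex p : Lex (Int × Int))) := by
  have hcmp : (fun (a b : Int × Int) => (decide (a.1 < b.1) || (!decide (b.1 < a.1) && decide (a.2 < b.2))))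
      = (fun (a b : Int × Int) => decide ((toLex a : Lex (Int × Int)) < toLex b)) := by
    funext a b
    rcases lt_trichotomy a.1 b.1 with h | h | h <;>
      by_cases h3 : a.2 < b.2 <;>
        (simp [Prod.Lex.toLex_lt_toLex, h, h3]; try omega)
  rw [PySem.List.sorted_eq_foldl_insertBy]
  unfold PySem.List.sorted2
  simp only [Bool.false_eq_true, if_false]
  rw [hcmp]

lemma pad_getD (s : List Int) (L i : Nat) (hi : i < L) :
    (s ++ List.replicate (L - s.length) (0 : Int)).getD i 0
      = if i < s.length then s.getD i 0 else 0 := by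
  by_cases h : i < s.length
  · rw [if_pos h, List.getD_eq_getElem _ _ (by simp; omega), List.getElem_append,
      dif_pos h, List.getD_eq_getElem _ _ h]
  · rw [if_neg h]
    have hlen : i < s.length + (L - s.length) := by omega
    rw [List.getD_eq_getElem _ _ (by simpa using hlen), List.getElem_append, dif_neg h]
    simp

-- per column: A's analysed-and-flattened row equals B's colFlat
lemma flat_eq (A : List (List Int)) (hA : A ≠ []) (y : Nat) :
    (analyzeRow (A.map (fun row => row.getD y 0))).foldl
        (fun acc p => acc ++ [p.2] ++ [p.1]) []
      = colFlat A y := by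
  set col : List Int := A.map (fun row => row.getD y 0) with hcol
  have hcolne : col ≠ [] := by simp [hcol]; exact hA
  set fcol : List Int := col.filter (fun v => decide (1 ≤ v)) with hfcol
  obtain ⟨a, t, hct⟩ := List.exists_cons_of_ne_nil hcolne
  have hmax : PySem.List.max? col (fun v => v) = some (t.foldl max a) := by
    rw [hct]; exact PySem.List.max?_id_cons a t
  set MAX : Int := t.foldl max a with hMAX
  have hle : ∀ v ∈ col, v ≤ MAX := fun v hv => PySem.List.max?_isMax hmax v hv
  -- A's accumulation loop is map-over-filter of the counted range
  have hfoldA : (PySem.List.pyRange 1 (MAX + 1)).foldl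
      (fun tm i =>
        if PySem.List.count col i = 0 then tm
        else tm ++ [((PySem.List.count col i : Int), i)]) []
      = ((PySem.List.pyRange 1 (MAX + 1)).filter (fun i => decide (List.count i col ≠ 0))).map
          (fun i => ((List.count i col : Int), i)) := by
    rw [show (fun (tm : List (Int × Int)) (i : Int) =>
          if PySem.List.count col i = 0 then tm
          else tm ++ [((PySem.List.count col i : Int), i)])
        = (fun tm i =>
          if (fun i => decide (List.count i col ≠ 0)) i = true then
            tm ++ [((fun i => ((List.count i col : Int), i)) i)]
          else tm) from by
      funext tm i
      rw [PySem.List.count_eq]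
      by_cases h : List.count i col = 0 <;> simp [h]]
    rw [PySem.List.foldl_append_if]
    simp
  -- B's dictionary loop is the counter of the filtered column
  have hfreq : (List.range A.length).foldl
      (fun d r =>
        if 1 ≤ (A.getD r []).getD y 0 then
          d.insert ((A.getD r []).getD y 0) (d.getD ((A.getD r []).getD y 0) 0 + 1)
        else d)
      (PySem.Dict.empty : PySem.Dict Int Int)
      = PySem.Dict.counter fcol := by
    rw [foldl_getD_range A []
      (fun d row =>
        if 1 ≤ row.getD y 0 then
          d.insert (row.getD y 0) (d.getD (row.getD y 0) 0 + 1)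
        else d)
      (PySem.Dict.empty : PySem.Dict Int Int)]
    rw [show A.foldl
        (fun d row =>
          if 1 ≤ row.getD y 0 then
            d.insert (row.getD y 0) (d.getD (row.getD y 0) 0 + 1)
          else d) (PySem.Dict.empty : PySem.Dict Int Int)
      = (A.map (fun row => row.getD y 0)).foldl
        (fun d v => if 1 ≤ v then d.insert v (d.getD v 0 + 1) else d)
        (PySem.Dict.empty : PySem.Dict Int Int) from by rw [List.foldl_map]]
    rw [← hcol, hfcol]
    rw [← PySem.Dict.foldl_insert_getD_add_one_eq_counter]
    rw [List.foldl_filter]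
    congr 1
    funext d v
    by_cases h : (1 : Int) ≤ v <;> simp [h]
  -- same distinct values on both sides
  have hmemiff : ∀ v : Int,
      v ∈ (PySem.List.pyRange 1 (MAX + 1)).filter (fun i => decide (List.count i col ≠ 0))
        ↔ v ∈ PySem.Set.ofList fcol := by
    intro v
    constructor
    · intro hvin
      rcases List.mem_filter.mp hvin with ⟨hr, hc⟩
      rcases PySem.List.mem_pyRange_one.mp hr with ⟨h1, h2⟩
      have hcnt : List.count v col ≠ 0 := by simpa using hc
      have hvcol : v ∈ col := by
        rw [← List.count_pos_iff]; omega
      exact (PySem.Set.mem_ofList _ _).mpr (List.mem_filter.mpr ⟨hvcol, by simpa using h1⟩)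
    · intro hvin
      rcases List.mem_filter.mp ((PySem.Set.mem_ofList _ _).mp hvin) with ⟨hvcol, h1⟩
      have h1' : (1 : Int) ≤ v := by simpa using h1
      refine List.mem_filter.mpr
        ⟨PySem.List.mem_pyRange_one.mpr ⟨h1', by have := hle v hvcol; omega⟩, ?_⟩
      have : List.count v col ≠ 0 := by
        rw [← Nat.pos_iff_ne_zero, List.count_pos_iff]; exact hvcol
      simpa using this
  -- hence the two pre-sort (count, value) lists are permutations of each other
  have hperm :
      (((PySem.List.pyRange 1 (MAX + 1)).filter (fun i => decide (List.count i col ≠ 0))).map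
          (fun i => ((List.count i col : Int), i))).Perm
        ((PySem.Set.ofList fcol).map (fun k => ((List.count k fcol : Int), k))) := by
    rw [show (PySem.Set.ofList fcol).map (fun k => ((List.count k fcol : Int), k))
        = (PySem.Set.ofList fcol).map (fun k => ((List.count k col : Int), k)) from
      List.map_congr_left (fun k hk => by
        have hk' : k ∈ fcol := (PySem.Set.mem_ofList fcol k).mp hk
        have hp : decide ((1 : Int) ≤ k) = true := (List.mem_filter.mp hk').2
        have hc : List.count k fcol = List.count k col := by
          rw [hfcol]; exact List.count_filter hp
        rw [hc])]
    exact List.Perm.map _ ((List.perm_ext_iff_of_nodup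
      ((PySem.List.nodup_pyRange_one 1 (MAX + 1)).filter _)
      (PySem.Set.nodup_ofList fcol)).mpr hmemiff)
  simp only [analyzeRow, colFlat, hmax, Option.getD_some, hfreq, hfoldA]
  rw [PySem.Dict.items_counter, List.map_map]
  rw [sorted2_eq_sorted_lex, sorted2_eq_sorted_lex]
  rw [PySem.List.sorted_eq_sorted_of_perm _ _ _
    (fun p q h => by simpa using congrArg ofLex h) hperm]
  rw [show (fun (acc : List Int) (p : Int × Int) => acc ++ [p.2] ++ [p.1])
      = (fun (acc : List Int) (p : Int × Int) => acc ++ [p.2, p.1]) from by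
    funext acc p; simp]
  rfl

-- A's pad-then-transpose of the per-column rows is B's direct grid assembly
lemma assemble (S : List (List Int)) (hS : S ≠ []) :
    spin (S.map (fun row =>
        row ++ List.replicate ((S.foldl (fun m row => max m row.length) 0) - row.length) (0 : Int)))
      = (List.range (S.foldl (fun m s => max m s.length) 0)).map
          (fun i => S.map (fun s => if i < s.length then s.getD i 0 else 0)) := by
  set ML := S.foldl (fun m row => max m row.length) 0 with hML
  rw [spin_eq]
  obtain ⟨s0, S', rfl⟩ := List.exists_cons_of_ne_nil hS
  have h0 : s0.length ≤ ML := by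
    have := (PySem.List.le_foldl_max_nat (s0 :: S') (fun row => row.length) 0).2
    exact this s0 (List.mem_cons_self)
  have hhead : (((s0 :: S').map (fun row =>
      row ++ List.replicate (ML - row.length) (0 : Int))).headD []).length = ML := by
    simp only [List.map_cons, List.headD_cons, List.length_append, List.length_replicate]
    omega
  rw [hhead]
  refine List.map_congr_left (fun i hi => ?_)
  rw [List.map_map]
  refine List.map_congr_left (fun s hs => ?_)
  simpa using pad_getD s ML i (List.mem_range.mp hi)

lemma op_C_eq (A : List (List Int)) (hA : A ≠ []) (hh : (A.headD []) ≠ []) :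
    op_C A = op_C_alt A := by
  have hc0 : (A.headD []).length ≠ 0 := by
    simpa [List.length_eq_zero_iff] using hh
  have hres : ((spin A).map analyzeRow).map
        (fun t => List.foldl (fun acc (p : Int × Int) => acc ++ [p.2] ++ [p.1]) [] t)
      = (List.range (A.headD []).length).map (fun c => colFlat A c) := by
    rw [spin_eq A, List.map_map, List.map_map]
    exact List.map_congr_left (fun y _ => flat_eq A hA y)
  simp only [op_C, op_C_alt]
  rw [hres]
  have hSne : (List.range (A.headD []).length).map (fun c => colFlat A c) ≠ [] := by
    simp only [ne_eq, List.map_eq_nil_iff, List.range_eq_nil]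
    exact hc0
  exact assemble _ hSne

-- ===== VERDICT (by name: the statement is the Claim_ definition above) =====
theorem op_C_spec : Claim_equal_op_C := by
  intro A _ hPre
  exact op_C_eq A hPre.1 hPre.2.1
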